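-- pv_equiv track=rewrite | github.com/Hoyby/aoc2022 | day7/main.py | freeUpEnoughSpace
-- ===== SOURCE A (Python) =====
-- def freeUpEnoughSpace(sizes, spaceNeeded, totalSpace):
--     usedSpace = sizes["/"]
--     availableSpace = totalSpace - usedSpace
--     needToFreeUp = spaceNeeded - availableSpace
--
--     smallest = None
--     for dir, size in sizes.items():
--         if smallest is None or size < smallest[1]:
--             if size >= needToFreeUp:
--                 smallest = (dir, size)
--
--     return smallest
-- ===== SOURCE B (Python) =====
-- def freeUpEnoughSpace(sizes, spaceNeeded, totalSpace):
--     needToFreeUp = spaceNeeded - (totalSpace - sizes["/"])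
--     for dir, size in sorted(sizes.items(), key=lambda kv: kv[1]):
--         if size >= needToFreeUp:
--             return (dir, size)
--     return None
-- ===== Notes on version B (the rewrite author's own statement) =====
-- stated objective: alternative
-- what changed: A's running-minimum loop with a nested qualification test is replaced by a stable sort by size followed by a scan returning the first directory whose size meets the required amount (stability preserves A's first-encountered tie behaviour).
import Mathlib
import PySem

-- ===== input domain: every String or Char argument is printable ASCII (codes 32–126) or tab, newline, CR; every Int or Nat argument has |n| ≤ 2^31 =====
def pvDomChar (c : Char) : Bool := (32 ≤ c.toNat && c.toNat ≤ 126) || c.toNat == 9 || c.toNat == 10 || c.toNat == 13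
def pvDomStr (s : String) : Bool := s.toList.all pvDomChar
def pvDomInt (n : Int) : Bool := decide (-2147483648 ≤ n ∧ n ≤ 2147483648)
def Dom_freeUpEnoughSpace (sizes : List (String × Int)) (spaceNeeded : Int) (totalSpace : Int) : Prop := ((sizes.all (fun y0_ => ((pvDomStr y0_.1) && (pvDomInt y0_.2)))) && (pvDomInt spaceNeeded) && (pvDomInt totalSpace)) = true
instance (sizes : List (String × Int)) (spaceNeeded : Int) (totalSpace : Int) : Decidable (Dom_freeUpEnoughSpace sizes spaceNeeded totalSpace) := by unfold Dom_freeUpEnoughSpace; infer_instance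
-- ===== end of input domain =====

-- B replaces A's running-minimum loop by a stable sort by size plus first-qualifying scan (alternative decomposition, same result).

-- ===== PORT A =====
-- sizes["/"]: first-match lookup in the association list (shared by both ports; raises KeyError when absent — excluded by Pre_)
def getSlash : List (String × Int) → Option Int
  | [] => none
  | kv :: t => if kv.1 = "/" then some kv.2 else getSlash t

-- one iteration of A's loop body
def aStep (needToFreeUp : Int) (smallest : Option (String × Int)) (kv : String × Int) : Option (String × Int) :=
  match smallest with
  | none => if needToFreeUp ≤ kv.2 then some kv else none
  | some m => if kv.2 < m.2 then (if needToFreeUp ≤ kv.2 then some kv else some m) else some m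

def freeUpEnoughSpace (sizes : List (String × Int)) (spaceNeeded : Int) (totalSpace : Int) : Option (String × Int) :=
  match getSlash sizes with
  | none => none   -- Python raises KeyError here; excluded by Pre_
  | some usedSpace =>
    let availableSpace := totalSpace - usedSpace
    let needToFreeUp := spaceNeeded - availableSpace
    sizes.foldl (aStep needToFreeUp) none

-- ===== PORT B =====
def freeUpEnoughSpace_alt (sizes : List (String × Int)) (spaceNeeded : Int) (totalSpace : Int) : Option (String × Int) :=
  match getSlash sizes with
  | none => none   -- Python raises KeyError here; excluded by Pre_
  | some used =>
    let needToFreeUp := spaceNeeded - (totalSpace - used)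
    (PySem.List.sorted sizes (fun kv => kv.2)).find? (fun kv => decide (needToFreeUp ≤ kv.2))

-- ===== PRECONDITION & SPEC =====
-- Pre_ excludes exactly the inputs where Python A raises KeyError: sizes has no key "/".
def Pre_freeUpEnoughSpace (sizes : List (String × Int)) (spaceNeeded : Int) (totalSpace : Int) : Prop :=
  "/" ∈ sizes.map Prod.fst
instance (sizes : List (String × Int)) (spaceNeeded : Int) (totalSpace : Int) : Decidable (Pre_freeUpEnoughSpace sizes spaceNeeded totalSpace) := by unfold Pre_freeUpEnoughSpace; infer_instance

def pvWitness_freeUpEnoughSpace : (List (String × Int)) × Int × Int := ([("/", 48), ("/a", 30), ("/b", 18)], 40, 70)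

def Spec_freeUpEnoughSpace (sizes : List (String × Int)) (spaceNeeded : Int) (totalSpace : Int) (out : Option (String × Int)) : Prop := out = freeUpEnoughSpace_alt sizes spaceNeeded totalSpace
instance (sizes : List (String × Int)) (spaceNeeded : Int) (totalSpace : Int) (out : Option (String × Int)) : Decidable (Spec_freeUpEnoughSpace sizes spaceNeeded totalSpace out) := by unfold Spec_freeUpEnoughSpace; infer_instance

-- ===== CLAIM (what is proved, stated in full; the proofs are below) =====
def Claim_equal_freeUpEnoughSpace : Prop := ∀ (sizes : List (String × Int)) (spaceNeeded : Int) (totalSpace : Int), Dom_freeUpEnoughSpace sizes spaceNeeded totalSpace → Pre_freeUpEnoughSpace sizes spaceNeeded totalSpace → Spec_freeUpEnoughSpace sizes spaceNeeded totalSpace (freeUpEnoughSpace sizes spaceNeeded totalSpace)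

-- ===== LEMMAS AND PROOFS =====

-- inserting x into a size-sorted list commutes with "first qualifying element" via A's loop step
lemma find_insertBy (need : Int) (x : String × Int) :
    ∀ (S : List (String × Int)), S.Pairwise (fun a b => a.2 ≤ b.2) →
    (PySem.List.insertBy (fun a b => decide (a.2 < b.2)) x S).find? (fun kv => decide (need ≤ kv.2))
      = aStep need (S.find? (fun kv => decide (need ≤ kv.2))) x := by
  intro S
  induction S with
  | nil =>
    intro _
    simp [PySem.List.insertBy, aStep, List.find?]
  | cons y ys ih =>
    intro hp
    have hp' : ys.Pairwise (fun a b => a.2 ≤ b.2) := hp.tail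
    have hmem : ∀ z ∈ ys, y.2 ≤ z.2 := by
      intro z hz; exact List.rel_of_pairwise_cons hp hz
    have hins : PySem.List.insertBy (fun a b => decide (a.2 < b.2)) x (y :: ys)
        = if x.2 < y.2 then x :: y :: ys
          else y :: PySem.List.insertBy (fun a b => decide (a.2 < b.2)) x ys := by
      by_cases hxy : x.2 < y.2 <;> simp [PySem.List.insertBy, hxy]
    rw [hins]
    by_cases hxy : x.2 < y.2
    · rw [if_pos hxy]
      by_cases hq : need ≤ x.2
      · rw [List.find?_cons_of_pos (by simpa using hq)]
        cases hfind : (y :: ys).find? (fun kv => decide (need ≤ kv.2)) with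
        | none => simp [aStep, hq]
        | some m =>
          have hm : m ∈ y :: ys := List.mem_of_find?_eq_some hfind
          have hym : y.2 ≤ m.2 := by
            rcases List.mem_cons.mp hm with h | h
            · simp [h]
            · exact hmem m h
          have hxm : x.2 < m.2 := lt_of_lt_of_le hxy hym
          simp [aStep, hxm, hq]
      · rw [List.find?_cons_of_neg (by simpa using hq)]
        cases hfind : (y :: ys).find? (fun kv => decide (need ≤ kv.2)) with
        | none => simp [aStep, hq]
        | some m => by_cases h : x.2 < m.2 <;> simp [aStep, h, hq]
    · rw [if_neg hxy]
      by_cases hqy : need ≤ y.2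
      · rw [List.find?_cons_of_pos (by simpa using hqy),
            List.find?_cons_of_pos (by simpa using hqy)]
        simp [aStep, hxy]
      · rw [List.find?_cons_of_neg (by simpa using hqy),
            List.find?_cons_of_neg (by simpa using hqy), ih hp']

-- first qualifying element of the sorted list = A's whole fold
lemma sorted_find_eq_fold (need : Int) (xs : List (String × Int)) :
    (PySem.List.sorted xs (fun kv => kv.2)).find? (fun kv => decide (need ≤ kv.2))
      = xs.foldl (aStep need) none := by
  induction xs using List.reverseRecOn with
  | nil => simp [PySem.List.sorted]
  | append_singleton xs x ih =>
    have hs : PySem.List.sorted (xs ++ [x]) (fun kv => kv.2)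
        = PySem.List.insertBy (fun a b => decide (a.2 < b.2)) x
            (PySem.List.sorted xs (fun kv => kv.2)) := by
      simp [PySem.List.sorted, List.foldl_append]
    have hpw : (PySem.List.sorted xs (fun kv => kv.2)).Pairwise (fun a b => a.2 ≤ b.2) :=
      PySem.List.sorted_pairwise xs (fun kv => kv.2)
    rw [hs, find_insertBy need x _ hpw, ih, List.foldl_append]
    simp

-- ===== VERDICT (by name: the statement is the Claim_ definition above) =====
theorem freeUpEnoughSpace_spec : Claim_equal_freeUpEnoughSpace := by
  intro sizes spaceNeeded totalSpace _ _
  unfold Spec_freeUpEnoughSpace freeUpEnoughSpace freeUpEnoughSpace_alt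
  cases h : getSlash sizes with
  | none => simp
  | some used =>
    simp only []
    rw [sorted_find_eq_fold]
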